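-- pv_equiv track=rewrite | github.com/usercrixus/CCppToolsComplement | srcs/vscodeIntegration/backend/srcs/script/v2/verifyJson.py | getDuplicateOutputMakefileErrors
-- ===== SOURCE A (Python) =====
-- from typing import Any, Callable
--
-- JsonObject = dict[str, Any]
--
-- def getDuplicateOutputMakefileErrors(entries: list[JsonObject]) -> list[str]:
--     errors: list[str] = []
--     seen: dict[str, int] = {}
--     for index, entry in enumerate(entries):
--         output_makefile = entry.get("output_makefile")
--         if output_makefile in seen:
--             first = seen[output_makefile]
--             errors.append(
--                 f"[entry {index}] duplicate output_makefile '{output_makefile}' (already used by entry {first})."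
--             )
--         else:
--             seen[output_makefile] = index
--     return errors
-- ===== SOURCE B (Python) =====
-- def getDuplicateOutputMakefileErrors(entries):
--     first_seen = {}
--     for index, entry in enumerate(entries):
--         v = entry.get("output_makefile")
--         if v not in first_seen:
--             first_seen[v] = index
--     errors = []
--     for index, entry in enumerate(entries):
--         v = entry.get("output_makefile")
--         first = first_seen[v]
--         if first != index:
--             errors.append(
--                 f"[entry {index}] duplicate output_makefile '{v}' (already used by entry {first})."
--             )
--     return errors
-- ===== Notes on version B (the rewrite author's own statement) =====
-- stated objective: alternative
-- what changed: A's single pass that interleaves dict updates with error emission is split into a first pass building a first-seen index dict and a second pass that emits the error for every entry that is not the first holder of its output_makefile value.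
import Mathlib
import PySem

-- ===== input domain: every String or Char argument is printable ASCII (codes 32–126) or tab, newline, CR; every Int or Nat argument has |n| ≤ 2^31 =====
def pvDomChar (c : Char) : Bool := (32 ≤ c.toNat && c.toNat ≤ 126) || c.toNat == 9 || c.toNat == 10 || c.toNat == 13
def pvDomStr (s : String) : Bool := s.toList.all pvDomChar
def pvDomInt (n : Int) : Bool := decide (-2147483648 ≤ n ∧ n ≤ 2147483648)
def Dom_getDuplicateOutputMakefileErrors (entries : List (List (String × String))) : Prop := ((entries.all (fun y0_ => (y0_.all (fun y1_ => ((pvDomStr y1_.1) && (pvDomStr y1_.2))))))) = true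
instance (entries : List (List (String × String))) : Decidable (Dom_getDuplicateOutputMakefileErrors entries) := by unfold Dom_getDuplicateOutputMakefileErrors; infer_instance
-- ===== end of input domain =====

-- B replaces A's single pass with interleaved dict/append updates by a first-seen index pass
-- followed by a pass that reports every entry that is not the first holder of its value (objective: alternative decomposition).

-- shared rendering of the f-string both Pythons contain verbatim (str(v) prints "None" for None)
def pvMsg (index : Int) (v : Option String) (first : Int) : String :=
  "[entry " ++ PySem.Int.toStr index ++ "] duplicate output_makefile '" ++
  (match v with | none => "None" | some s => s) ++ "' (already used by entry " ++ PySem.Int.toStr first ++ ")."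

-- ===== PORT A =====
def getDuplicateOutputMakefileErrors (entries : List (List (String × String))) : List String :=
  -- errors = []; seen = {}; for index, entry in enumerate(entries): …
  ((PySem.List.enumerate entries).foldl
    (fun (st : List String × PySem.Dict (Option String) Int) p =>
      let output_makefile := (PySem.Dict.mk p.2).get? "output_makefile"
      match st.2.get? output_makefile with
      | some first => (st.1 ++ [pvMsg p.1 output_makefile first], st.2)
      | none => (st.1, st.2.insert output_makefile p.1))
    ([], PySem.Dict.empty)).1

-- ===== PORT B =====
def getDuplicateOutputMakefileErrors_alt (entries : List (List (String × String))) : List String :=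
  -- pass 1: first_seen[v] = index of first occurrence
  let first_seen := (PySem.List.enumerate entries).foldl
    (fun (d : PySem.Dict (Option String) Int) p =>
      let v := (PySem.Dict.mk p.2).get? "output_makefile"
      if !(d.contains v) then d.insert v p.1 else d)
    PySem.Dict.empty
  -- pass 2: first = first_seen[v] (KeyError impossible: every v was inserted in pass 1, so the 0 default is never used)
  (PySem.List.enumerate entries).foldl
    (fun errs p =>
      let v := (PySem.Dict.mk p.2).get? "output_makefile"
      let first := first_seen.getD v 0
      if first ≠ p.1 then errs ++ [pvMsg p.1 v first] else errs)
    []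

-- ===== PRECONDITION & SPEC =====
def Spec_getDuplicateOutputMakefileErrors (entries : List (List (String × String))) (out : List String) : Prop := out = getDuplicateOutputMakefileErrors_alt entries
instance (entries : List (List (String × String))) (out : List String) : Decidable (Spec_getDuplicateOutputMakefileErrors entries out) := by unfold Spec_getDuplicateOutputMakefileErrors; infer_instance

-- ===== CLAIM (what is proved, stated in full; the proofs are below) =====
def Claim_equal_getDuplicateOutputMakefileErrors : Prop := ∀ (entries : List (List (String × String))), Dom_getDuplicateOutputMakefileErrors entries → Spec_getDuplicateOutputMakefileErrors entries (getDuplicateOutputMakefileErrors entries)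

-- ===== LEMMAS AND PROOFS =====

-- B's pass-1 step, named for the proofs (definitionally the lambda in B's port)
def pvBuild (d : PySem.Dict (Option String) Int) (p : Int × List (String × String)) : PySem.Dict (Option String) Int :=
  if !(d.contains ((PySem.Dict.mk p.2).get? "output_makefile")) then d.insert ((PySem.Dict.mk p.2).get? "output_makefile") p.1 else d

-- pass 1 never overwrites: an existing binding survives
lemma pvBuild_preserves (ps : List (Int × List (String × String)))
    (d : PySem.Dict (Option String) Int) (v : Option String) (j : Int)
    (h : d.get? v = some j) : (ps.foldl pvBuild d).get? v = some j := by
  induction ps generalizing d with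
  | nil => exact h
  | cons p ps ih =>
      simp only [List.foldl_cons]
      apply ih
      unfold pvBuild
      split
      · next hc =>
          rw [PySem.Dict.get?_insert_of_ne]
          · exact h
          · intro hv
            rw [PySem.Dict.contains_eq_isSome_get?, ← hv, h] at hc
            simp at hc
      · exact h

lemma pvMain (ps : List (Int × List (String × String)))
    (seen : PySem.Dict (Option String) Int) (errs : List String)
    (hseen : ∀ v j, seen.get? v = some j → ∀ p ∈ ps, j ≠ p.1)
    (hnd : ps.Pairwise (fun p q => p.1 ≠ q.1)) :
    ps.foldl
      (fun (st : List String × PySem.Dict (Option String) Int) p =>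
        let output_makefile := (PySem.Dict.mk p.2).get? "output_makefile"
        match st.2.get? output_makefile with
        | some first => (st.1 ++ [pvMsg p.1 output_makefile first], st.2)
        | none => (st.1, st.2.insert output_makefile p.1))
      (errs, seen)
    = (ps.foldl
        (fun errs p =>
          let v := (PySem.Dict.mk p.2).get? "output_makefile"
          let first := (ps.foldl pvBuild seen).getD v 0
          if first ≠ p.1 then errs ++ [pvMsg p.1 v first] else errs)
        errs,
       ps.foldl pvBuild seen) := by
  induction ps generalizing seen errs with
  | nil => rfl
  | cons p ps ih =>
      have hfold : (p :: ps).foldl pvBuild seen = ps.foldl pvBuild (pvBuild seen p) := by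
        simp [List.foldl_cons]
      set v := (PySem.Dict.mk p.2).get? "output_makefile" with hv
      cases hg : seen.get? v with
      | some j =>
          -- A appends the message; B's first_seen keeps seen's binding j, and j ≠ p.1
          have hbuild : pvBuild seen p = seen := by
            unfold pvBuild
            rw [← hv, PySem.Dict.contains_eq_isSome_get?, hg]
            simp
          have hj : j ≠ p.1 := hseen v j hg p (by simp)
          rw [hfold, hbuild]
          have hfs : ((ps.foldl pvBuild seen).getD v 0) = j := by
            rw [PySem.Dict.getD_eq_get?_getD, pvBuild_preserves ps seen v j hg]
            rfl
          simp only [List.foldl_cons, ← hv, hg]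
          rw [ih seen (errs ++ [pvMsg p.1 v j])
                (fun v' j' h' q hq => hseen v' j' h' q (List.mem_cons_of_mem _ hq))
                (List.Pairwise.of_cons hnd)]
          rw [hfs, if_pos hj]
      | none =>
          -- A inserts; B's first_seen binds v to p.1, so the head is skipped in pass 2
          have hbuild : pvBuild seen p = seen.insert v p.1 := by
            unfold pvBuild
            rw [← hv, PySem.Dict.contains_eq_isSome_get?, hg]
            simp
          have hseen' : ∀ v' j', (seen.insert v p.1).get? v' = some j' → ∀ q ∈ ps, j' ≠ q.1 := by
            intro v' j' h' q hq
            by_cases hvv : v' = v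
            · subst hvv
              rw [PySem.Dict.get?_insert_self] at h'
              cases h'
              exact (List.rel_of_pairwise_cons hnd hq)
            · rw [PySem.Dict.get?_insert_of_ne _ _ hvv] at h'
              exact hseen v' j' h' q (List.mem_cons_of_mem _ hq)
          rw [hfold, hbuild]
          have hfs : ((ps.foldl pvBuild (seen.insert v p.1)).getD v 0) = p.1 := by
            rw [PySem.Dict.getD_eq_get?_getD,
                pvBuild_preserves ps _ v p.1 (PySem.Dict.get?_insert_self _ _ _)]
            rfl
          simp only [List.foldl_cons, ← hv, hg]
          rw [ih (seen.insert v p.1) errs hseen' (List.Pairwise.of_cons hnd)]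
          rw [hfs, if_neg (by simp)]

-- ===== VERDICT (by name: the statement is the Claim_ definition above) =====
theorem getDuplicateOutputMakefileErrors_spec : Claim_equal_getDuplicateOutputMakefileErrors := by
  intro entries _
  unfold Spec_getDuplicateOutputMakefileErrors getDuplicateOutputMakefileErrors getDuplicateOutputMakefileErrors_alt
  have hnd : (PySem.List.enumerate entries).Pairwise (fun p q => p.1 ≠ q.1) :=
    (PySem.List.pairwise_lt_enumerate entries 0).imp (fun h => ne_of_lt h)
  have hseen : ∀ v j, (PySem.Dict.empty : PySem.Dict (Option String) Int).get? v = some j →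
      ∀ p ∈ PySem.List.enumerate entries, j ≠ p.1 := by
    intro v j h
    rw [PySem.Dict.get?_empty] at h
    exact absurd h (by simp)
  rw [pvMain (PySem.List.enumerate entries) PySem.Dict.empty [] hseen hnd]
  have hb : (fun (d : PySem.Dict (Option String) Int) (p : Int × List (String × String)) =>
      let v := (PySem.Dict.mk p.2).get? "output_makefile"
      if !(d.contains v) then d.insert v p.1 else d) = pvBuild := by
    funext d p
    rfl
  rw [hb]
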